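-- pv_equiv track=rewrite | github.com/evocrestco/api_exchange_core | api_exchange_core/processors/v2/output_handlers/queue_output.py | _is_valid_queue_name
-- ===== SOURCE A (Python) =====
-- def _is_valid_queue_name(queue_name: str) -> bool:
--     """
--     Validate Azure Storage queue name according to naming rules.
--
--     Rules:
--     - Must be 3-63 characters long
--     - Must contain only lowercase letters, numbers, and hyphens
--     - Must start and end with a letter or number
--     - Cannot contain consecutive hyphens
--     """
--     if not queue_name or len(queue_name) < 3 or len(queue_name) > 63:
--         return False
--
--     if not queue_name[0].isalnum() or not queue_name[-1].isalnum():
--         return False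
--
--     if "--" in queue_name:
--         return False
--
--     return all(c.islower() or c.isdigit() or c == "-" for c in queue_name)
-- ===== SOURCE B (Python) =====
-- def _is_valid_queue_name(queue_name: str) -> bool:
--     # Split on hyphens: the name is valid iff its length is 3-63 and every
--     # hyphen-separated segment is nonempty and made of lowercase letters/digits.
--     # (Nonempty segments <=> no leading/trailing hyphen and no consecutive hyphens.)
--     if not (3 <= len(queue_name) <= 63):
--         return False
--     return all(part != "" and all(c.islower() or c.isdigit() for c in part)
--                for part in queue_name.split("-"))
-- ===== Notes on version B (the rewrite author's own statement) =====
-- stated objective: alternative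
-- what changed: B validates via a hyphen-split: after the length guard it splits the name on hyphens and requires every segment to be nonempty and all lowercase/digit, replacing A's boundary isalnum checks, double-hyphen substring search and all() charset scan.
import Mathlib
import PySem

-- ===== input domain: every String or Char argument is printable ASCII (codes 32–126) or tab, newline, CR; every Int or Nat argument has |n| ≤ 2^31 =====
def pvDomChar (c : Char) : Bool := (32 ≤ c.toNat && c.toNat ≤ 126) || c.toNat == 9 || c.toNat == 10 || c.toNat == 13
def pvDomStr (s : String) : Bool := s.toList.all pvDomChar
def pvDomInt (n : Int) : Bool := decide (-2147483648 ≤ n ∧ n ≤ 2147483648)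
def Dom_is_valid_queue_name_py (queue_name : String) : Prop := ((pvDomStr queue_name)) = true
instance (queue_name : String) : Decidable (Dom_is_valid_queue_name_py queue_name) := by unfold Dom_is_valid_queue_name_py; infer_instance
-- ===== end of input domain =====

-- B validates by splitting the name on hyphens (after the length guard): every segment must be
-- nonempty and lowercase/digit; this replaces A's boundary, double-hyphen and charset checks.


-- ===== PORT A =====
def is_valid_queue_name_py (queue_name : String) : Bool :=
  if queue_name.toList.length = 0 || queue_name.toList.length < 3 || 63 < queue_name.toList.length then false
  else
    match PySem.List.pyGet? queue_name.toList 0, PySem.List.pyGet? queue_name.toList (-1) with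
    | some c0, some cl =>
      if !(PySem.Chars.isalnum c0) || !(PySem.Chars.isalnum cl) then false
      else if PySem.Chars.isIn ['-', '-'] queue_name.toList then false
      else queue_name.toList.all (fun c => PySem.Chars.islower c || PySem.Chars.isdigit c || c == '-')
    | _, _ => false

-- ===== PORT B =====
-- Source B: length guard, then split on '-' and require every segment nonempty and lowercase/digit
-- (queue_name.split("-") is ported as the standard-library List.splitOn on the char list)
def is_valid_queue_name_py_alt (queue_name : String) : Bool :=
  if !(3 ≤ queue_name.toList.length && queue_name.toList.length ≤ 63) then false
  else
    (List.splitOn '-' queue_name.toList).all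
      (fun p => !(p == []) && p.all (fun c => PySem.Chars.islower c || PySem.Chars.isdigit c))

-- ===== PRECONDITION & SPEC =====
def Spec_is_valid_queue_name_py (queue_name : String) (out : Bool) : Prop := out = is_valid_queue_name_py_alt queue_name
instance (queue_name : String) (out : Bool) : Decidable (Spec_is_valid_queue_name_py queue_name out) := by unfold Spec_is_valid_queue_name_py; infer_instance

-- ===== CLAIM (what is proved, stated in full; the proofs are below) =====
def Claim_equal_is_valid_queue_name_py : Prop := ∀ (queue_name : String), Dom_is_valid_queue_name_py queue_name → Spec_is_valid_queue_name_py queue_name (is_valid_queue_name_py queue_name)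

-- ===== LEMMAS AND PROOFS =====

-- no consecutive hyphens, as a head?-based recursion
def pvNoConsec : List Char → Bool
  | [] => true
  | c :: t => !(c == '-' && t.head? == some '-') && pvNoConsec t

theorem pvAlnum_of_P (c : Char)
    (h : (PySem.Chars.islower c || PySem.Chars.isdigit c) = true) :
    PySem.Chars.isalnum c = true := by
  simp [PySem.Chars.isalnum, PySem.Chars.isalpha, PySem.Chars.islower,
        PySem.Chars.isdigit] at *
  rcases h with h | h
  · exact Or.inl (Or.inr h)
  · exact Or.inr h

theorem pvGet0 (cs : List Char) (h : cs ≠ []) :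
    PySem.List.pyGet? cs 0 = some (cs.head h) := by
  have hl : 0 < cs.length := List.length_pos_iff.mpr h
  simp [PySem.List.pyGet?, PySem.List.pyIdx?, hl, List.head_eq_getElem]

theorem pvGetLast (cs : List Char) (h : cs ≠ []) :
    PySem.List.pyGet? cs (-1) = some (cs.getLast h) := by
  have hl : 1 ≤ cs.length := List.length_pos_iff.mpr h
  have hlt : cs.length - 1 < cs.length := by omega
  simp [PySem.List.pyGet?, PySem.List.pyIdx?, hl, hlt, List.getLast_eq_getElem]

theorem pvIsIn_dd (cs : List Char) :
    PySem.Chars.isIn ['-', '-'] cs = !(pvNoConsec cs) := by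
  induction cs with
  | nil => decide
  | cons c t ih =>
    rcases Bool.eq_false_or_eq_true (PySem.Chars.isIn ['-', '-'] (c :: t)) with h | h
    · rw [h]
      rw [PySem.Chars.isIn_iff_infix] at h
      rcases (List.infix_cons_iff).mp h with hp | hs
      · rcases List.cons_prefix_cons.mp hp with ⟨rfl, hp2⟩
        have hh : t.head? = some '-' := by
          rcases t with _ | ⟨d, t'⟩
          · simp at hp2
          · rcases List.cons_prefix_cons.mp hp2 with ⟨rfl, _⟩; rfl
        simp [pvNoConsec, hh]
      · have h1 : PySem.Chars.isIn ['-', '-'] t = true := by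
          rw [PySem.Chars.isIn_iff_infix]; exact hs
        rw [ih] at h1
        have h2 : pvNoConsec t = false := by
          rcases Bool.eq_false_or_eq_true (pvNoConsec t) with h2 | h2
          all_goals first | exact h2 | (rw [h2] at h1; exact absurd h1 (by decide))
        simp [pvNoConsec, h2]
    · rw [h]
      rw [PySem.Chars.isIn_eq_false_iff] at h
      have hni : ¬ PySem.Chars.isIn ['-', '-'] t = true := by
        rw [PySem.Chars.isIn_iff_infix]
        intro hinf; exact h (hinf.trans (List.suffix_cons c t).isInfix)
      have ht : pvNoConsec t = true := by
        rcases Bool.eq_false_or_eq_true (pvNoConsec t) with h2 | h2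
        all_goals first | exact h2 | (exfalso; apply hni; rw [ih, h2]; rfl)
      have hpref : (c == '-' && t.head? == some '-') = false := by
        rcases Bool.eq_false_or_eq_true (c == '-' && t.head? == some '-') with hb | hb
        all_goals first
        | exact hb
        | · exfalso
            simp only [Bool.and_eq_true, beq_iff_eq] at hb
            obtain ⟨rfl, hh⟩ := hb
            rcases t with _ | ⟨d, t'⟩
            · simp at hh
            · simp only [List.head?_cons, Option.some.injEq] at hh
              subst hh
              exact h ⟨[], t', by simp⟩
      simp [pvNoConsec, ht, hpref]

-- boolean all distributes over && of predicates
theorem pvAll_and {α : Type} (l : List α) (f g : α → Bool) :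
    (l.all fun x => f x && g x) = (l.all f && l.all g) := by
  induction l with
  | nil => rfl
  | cons x t ih =>
    simp only [List.all_cons, ih]
    cases f x <;> cases g x <;> cases t.all f <;> cases t.all g <;> rfl

-- the charset side of the split: every segment all-P  ⇔  every char is P or a hyphen
theorem pvSplit_charset (P : Char → Bool) (cs : List Char) :
    (List.splitOn '-' cs).all (fun p => p.all P)
      = cs.all (fun c => P c || c == '-') := by
  induction cs with
  | nil => rfl
  | cons c t ih =>
    by_cases hc : c = '-'
    · subst hc
      have : List.splitOn '-' ('-' :: t) = [] :: List.splitOn '-' t := by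
        simp [List.splitOn, List.splitOnP_cons]
      rw [this]
      simp [ih]
    · have hsp : List.splitOn '-' (c :: t)
          = (List.splitOn '-' t).modifyHead (List.cons c) := by
        simp [List.splitOn, List.splitOnP_cons, hc]
      obtain ⟨h, rest, hhr⟩ : ∃ h rest, List.splitOn '-' t = h :: rest := by
        rcases e : List.splitOn '-' t with _ | ⟨h, rest⟩
        · exact absurd e (List.splitOnP_ne_nil _ _)
        · exact ⟨h, rest, rfl⟩
      rw [hsp, hhr, List.modifyHead_cons]
      rw [hhr] at ih
      simp only [List.all_cons] at ih ⊢
      have hcb : (c == '-') = false := by simp [hc]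
      rw [hcb]
      cases hP : P c
      · simp
      · simp only [Bool.true_and, Bool.true_or, Bool.true_and] at ih ⊢
        exact ih

-- the structure of the split: first segment emptiness, and the tail segments' nonemptiness
theorem pvSplit_shape (cs : List Char) :
    ∃ h rest, List.splitOn '-' cs = h :: rest
      ∧ h.isEmpty = (cs.isEmpty || cs.head? == some '-')
      ∧ rest.all (fun p => !p.isEmpty)
          = (pvNoConsec cs && !(cs.getLast? == some '-')) := by
  induction cs with
  | nil => exact ⟨[], [], rfl, rfl, rfl⟩
  | cons c t ih =>
    obtain ⟨h, rest, hhr, h1, h2⟩ := ih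
    by_cases hc : c = '-'
    · subst hc
      refine ⟨[], h :: rest, ?_, rfl, ?_⟩
      · rw [show List.splitOn '-' ('-' :: t) = [] :: List.splitOn '-' t from by
          simp [List.splitOn, List.splitOnP_cons], hhr]
      rcases t with _ | ⟨d, t'⟩
      · simp only [List.isEmpty_nil, Bool.true_or] at h1
        simp [h1]
      · simp only [List.isEmpty_cons, List.head?_cons, Bool.false_or] at h1
        rw [List.all_cons, h2, h1]
        simp only [pvNoConsec, List.head?_cons, List.getLast?_cons_cons]
        cases (some d == some '-') <;>
          cases pvNoConsec t' <;>
          cases ((d :: t').getLast? == some '-') <;> simp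
    · have hsp : List.splitOn '-' (c :: t)
          = (List.splitOn '-' t).modifyHead (List.cons c) := by
        simp [List.splitOn, List.splitOnP_cons, hc]
      refine ⟨c :: h, rest, by rw [hsp, hhr, List.modifyHead_cons], by simp [hc], ?_⟩
      rw [h2]
      rcases t with _ | ⟨d, t'⟩
      · simp [pvNoConsec, hc]
      · have hgl : (c :: d :: t').getLast? = (d :: t').getLast? := by
          simp [List.getLast?_cons_cons]
        rw [hgl]
        simp only [pvNoConsec, List.head?_cons]
        have hcb : (c == '-') = false := by simp [hc]
        rw [hcb]
        simp

-- ===== VERDICT (by name: the statement is the Claim_ definition above) =====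
theorem is_valid_queue_name_py_spec : Claim_equal_is_valid_queue_name_py := by
  intro s _
  unfold Spec_is_valid_queue_name_py is_valid_queue_name_py is_valid_queue_name_py_alt
  generalize s.toList = cs
  by_cases hlen : cs.length < 3 ∨ 63 < cs.length
  · have hA : (decide (cs.length = 0) || decide (cs.length < 3) || decide (63 < cs.length)) = true := by
      simp only [Bool.or_eq_true, decide_eq_true_eq]; omega
    have hB : (!(decide (3 ≤ cs.length) && decide (cs.length ≤ 63))) = true := by
      simp only [Bool.not_eq_true', Bool.and_eq_false_iff, decide_eq_false_iff_not]; omega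
    rw [hA, hB]
    simp only [if_true]
  · simp only [not_or, not_lt] at hlen
    obtain ⟨hl1, hl2⟩ := hlen
    have hne : cs ≠ [] := by
      intro h; rw [h] at hl1; simp at hl1
    have hA : (decide (cs.length = 0) || decide (cs.length < 3) || decide (63 < cs.length)) = false := by
      simp only [Bool.or_eq_false_iff, decide_eq_false_iff_not]
      refine ⟨⟨?_, ?_⟩, ?_⟩ <;> omega
    have hB : (!(decide (3 ≤ cs.length) && decide (cs.length ≤ 63))) = false := by
      simp only [Bool.not_eq_false', Bool.and_eq_true, decide_eq_true_eq]
      constructor <;> omega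
    rw [hA, hB]
    simp only [Bool.false_eq_true, if_false]
    rw [pvGet0 cs hne, pvGetLast cs hne]
    set c0 := cs.head hne with hc0
    set cl := cs.getLast hne with hcl
    rw [pvIsIn_dd]
    -- rewrite B's side through the split lemmas
    obtain ⟨h, rest, hhr, h1, h2⟩ := pvSplit_shape cs
    have hBside :
        (List.splitOn '-' cs).all
            (fun p => !(p == []) && p.all (fun c => PySem.Chars.islower c || PySem.Chars.isdigit c))
          = (!(cs.isEmpty || cs.head? == some '-')
              && (pvNoConsec cs && !(cs.getLast? == some '-'))
              && cs.all (fun c => (PySem.Chars.islower c || PySem.Chars.isdigit c) || c == '-')) := by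
      have heq : (fun p : List Char => !(p == []) && p.all (fun c => PySem.Chars.islower c || PySem.Chars.isdigit c))
          = (fun p : List Char => (fun p : List Char => !p.isEmpty) p && (fun p : List Char => p.all (fun c => PySem.Chars.islower c || PySem.Chars.isdigit c)) p) := by
        funext p; rcases p with _ | ⟨x, t⟩ <;> rfl
      rw [heq, pvAll_and,
          pvSplit_charset (fun c => PySem.Chars.islower c || PySem.Chars.isdigit c) cs,
          hhr]
      simp only [List.all_cons, h1, h2]
    rw [hBside]
    have hhead : cs.head? = some c0 := by rw [hc0, List.head?_eq_some_head hne]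
    have hlast : cs.getLast? = some cl := by rw [hcl, List.getLast?_eq_some_getLast hne]
    have hemp : cs.isEmpty = false := by simp [hne]
    rw [hhead, hlast, hemp]
    simp only [Bool.false_or, Option.some_beq_some]
    by_cases hall : cs.all (fun c => PySem.Chars.islower c || PySem.Chars.isdigit c || c == '-') = true
    · have hPc0 : (PySem.Chars.islower c0 || PySem.Chars.isdigit c0 || c0 == '-') = true :=
        (List.all_eq_true.mp hall) c0 (List.head_mem hne)
      have hPcl : (PySem.Chars.islower cl || PySem.Chars.isdigit cl || cl == '-') = true :=
        (List.all_eq_true.mp hall) cl (List.getLast_mem hne)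
      have key : ∀ d : Char, (PySem.Chars.islower d || PySem.Chars.isdigit d || d == '-') = true →
          PySem.Chars.isalnum d = !(d == '-') := by
        intro d hd
        by_cases hdd : d = '-'
        · subst hdd; decide
        · have hb : (d == '-') = false := by simp [hdd]
          rw [hb, Bool.not_false]
          apply pvAlnum_of_P
          simp only [Bool.or_eq_true] at hd ⊢
          rcases hd with (h | h) | h
          · exact Or.inl h
          · exact Or.inr h
          · exact absurd (by simpa using h) hdd
      rw [key c0 hPc0, key cl hPcl, hall]
      cases h0d : (c0 == '-') <;> cases hld : (cl == '-') <;>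
        cases hnc : pvNoConsec cs <;> simp
    · have hall1 : cs.all (fun c => PySem.Chars.islower c || PySem.Chars.isdigit c || c == '-') = false := by
        simpa using hall
      rw [hall1]
      cases h1' : (!PySem.Chars.isalnum c0 || !PySem.Chars.isalnum cl) <;>
        cases h3 : pvNoConsec cs <;> simp
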